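-- pv_equiv track=rewrite | github.com/homeinfogmbh/hwdb | terminallib/misc.py | is_label
-- ===== SOURCE A (Python) =====
-- from string import ascii_letters, digits
--
-- LET_DIG = ascii_letters + digits
--
-- LET_DIG_HYP = LET_DIG + '-'
--
-- def is_label(string, strict=True):
--     """Checks whether the string is a label according to RFC-1035.
--     See: <https://tools.ietf.org/html/rfc1035>.
--     """
--
--     if not string:
--         return False
--
--     if strict:
--         if string[0] not in ascii_letters:
--             return False
--     else:
--         if string[0] not in LET_DIG:
--             return False
--
--     if string[-1] not in LET_DIG:
--         return False
--
--     if not all(char in LET_DIG_HYP for char in string):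
--         return False
--
--     return True
-- ===== SOURCE B (Python) =====
-- from string import ascii_letters, digits
--
-- LET_DIG = ascii_letters + digits
--
--
-- def is_label(string, strict=True):
--     """Checks whether the string is a label according to RFC-1035,
--     via a single left-to-right pass (a small DFA):
--     state 0 = at start, 1 = just read a hyphen, 2 = just read a letter/digit.
--     Accept iff we end in state 2."""
--     state = 0
--     for char in string:
--         if state == 0:
--             if char not in (ascii_letters if strict else LET_DIG):
--                 return False
--             state = 2
--         elif char in LET_DIG:
--             state = 2
--         elif char == '-':
--             state = 1
--         else:
--             return False
--     return state == 2
-- ===== Notes on version B (the rewrite author's own statement) =====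
-- stated objective: alternative
-- what changed: Replaced A's four separate checks (emptiness, first char, last char via negative indexing, then an all() scan over the whole string) with a single left-to-right pass driving a 3-state DFA; no indexing and no second scan.
import Mathlib
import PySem

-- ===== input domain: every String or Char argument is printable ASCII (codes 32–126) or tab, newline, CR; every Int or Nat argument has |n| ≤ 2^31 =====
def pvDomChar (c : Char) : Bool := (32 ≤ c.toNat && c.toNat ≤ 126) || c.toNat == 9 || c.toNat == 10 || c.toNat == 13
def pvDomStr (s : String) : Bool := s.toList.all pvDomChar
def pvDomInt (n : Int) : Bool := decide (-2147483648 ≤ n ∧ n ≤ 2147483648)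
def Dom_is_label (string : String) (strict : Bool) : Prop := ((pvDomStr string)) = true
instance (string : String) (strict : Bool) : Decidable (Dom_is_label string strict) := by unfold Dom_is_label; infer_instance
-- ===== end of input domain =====

-- B replaces A's four separate checks (emptiness, first char, last char, all() scan) with a single
-- left-to-right pass driving a 3-state DFA (alternative decomposition, same asymptotic cost).

-- ===== PORT A =====
-- ascii_letters, digits, LET_DIG, LET_DIG_HYP from the Python module; Python's `char in <str>`
-- is character membership, ported as list membership via List.contains.
def asciiLetters : List Char := "abcdefghijklmnopqrstuvwxyzABCDEFGHIJKLMNOPQRSTUVWXYZ".toList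
def digitsL : List Char := "0123456789".toList
def letDig : List Char := asciiLetters ++ digitsL
def letDigHyp : List Char := letDig ++ ['-']

def is_label (string : String) (strict : Bool) : Bool :=
  match string.toList with
  | [] => false
  | c :: rest =>
    if (if strict then !asciiLetters.contains c else !letDig.contains c) then false
    else if !letDig.contains ((c :: rest).getLast (List.cons_ne_nil c rest)) then false
    else if !((c :: rest).all (fun ch => letDigHyp.contains ch)) then false
    else true


-- ===== PORT B =====
-- the DFA loop of Source B: state 0 = at start, 1 = just read '-', 2 = just read a letter/digit;
-- each `return False` becomes an immediate false, the final `return state == 2` is the [] case.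
def altGo (strict : Bool) (state : Nat) : List Char → Bool
  | [] => state == 2
  | c :: rest =>
    if state == 0 then
      if !(if strict then asciiLetters.contains c else letDig.contains c) then false
      else altGo strict 2 rest
    else if letDig.contains c then altGo strict 2 rest
    else if c == '-' then altGo strict 1 rest
    else false

def is_label_alt (string : String) (strict : Bool) : Bool := altGo strict 0 string.toList


-- ===== PRECONDITION & SPEC =====
def Spec_is_label (string : String) (strict : Bool) (out : Bool) : Prop := out = is_label_alt string strict
instance (string : String) (strict : Bool) (out : Bool) : Decidable (Spec_is_label string strict out) := by unfold Spec_is_label; infer_instance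

-- ===== CLAIM (what is proved, stated in full; the proofs are below) =====
def Claim_equal_is_label : Prop := ∀ (string : String) (strict : Bool), Dom_is_label string strict → Spec_is_label string strict (is_label string strict)

-- ===== LEMMAS AND PROOFS =====
theorem altGo_zero (strict : Bool) (c : Char) (rest : List Char) :
    altGo strict 0 (c :: rest) =
      if (if strict then asciiLetters.contains c else letDig.contains c) then altGo strict 2 rest else false := by
  cases strict <;> simp [altGo]


theorem altGo_succ (strict : Bool) (s : Nat) (hne : s ≠ 0) (c : Char) (rest : List Char) :
    altGo strict s (c :: rest) =
      (if letDig.contains c then altGo strict 2 rest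
       else if c = '-' then altGo strict 1 rest else false) := by
  simp only [altGo, if_neg (show ¬ ((s == 0) = true) by simpa using hne)]
  by_cases h1 : letDig.contains c = true
  · simp [h1]
  · simp only [h1, if_neg h1]
    by_cases h2 : c = '-' <;> simp [h2]

theorem altGo_mid (strict : Bool) (s : Nat) (hs : s = 1 ∨ s = 2) (cs : List Char) :
    altGo strict s cs =
      (cs.all (fun ch => letDigHyp.contains ch) &&
        (match cs.getLast? with
         | none => s == 2
         | some c => letDig.contains c)) := by
  induction cs generalizing s with
  | nil => simp [altGo]
  | cons c rest ih =>
    have hne : s ≠ 0 := by rcases hs with h | h <;> omega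
    rw [altGo_succ strict s hne]
    by_cases h1 : letDig.contains c = true
    · have hm : c ∈ letDig := by simpa using h1
      rw [if_pos h1, ih 2 (Or.inr rfl)]
      cases rest with
      | nil => simp [hm, letDigHyp, List.contains_append]
      | cons d rest' =>
        obtain ⟨x, hx⟩ : ∃ x, (d :: rest').getLast? = some x :=
          ⟨(d :: rest').getLast (by simp), List.getLast?_eq_some_getLast (by simp)⟩
        simp [hm, letDigHyp, List.contains_append, hx]
    · have hm : c ∉ letDig := by simpa using h1
      rw [if_neg h1]
      by_cases h2 : c = '-'
      · subst h2
        rw [if_pos rfl, ih 1 (Or.inl rfl)]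
        cases rest with
        | nil => simp [letDigHyp, List.contains_append, hm]
        | cons d rest' =>
          obtain ⟨x, hx⟩ : ∃ x, (d :: rest').getLast? = some x :=
            ⟨(d :: rest').getLast (by simp), List.getLast?_eq_some_getLast (by simp)⟩
          simp [letDigHyp, List.contains_append, hx]
      · rw [if_neg h2]
        cases rest with
        | nil => simp [letDigHyp, List.contains_append, hm, h2]
        | cons d rest' =>
          have hnh : c ∉ letDigHyp := by simp [letDigHyp, hm, h2]
          simp [hnh]

theorem letters_sub_letDig (c : Char) (h : asciiLetters.contains c = true) :
    letDig.contains c = true := by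
  simp only [letDig, List.contains_append, Bool.or_eq_true]
  exact Or.inl h

theorem is_label_eq_alt (string : String) (strict : Bool) :
    is_label string strict = is_label_alt string strict := by
  unfold is_label is_label_alt
  cases hcs : string.toList with
  | nil => simp [altGo]
  | cons c rest =>
    dsimp only
    rw [altGo_zero]
    by_cases hfirst : (if strict then asciiLetters.contains c else letDig.contains c) = true
    · rw [if_pos hfirst]
      rw [if_neg (by cases strict <;> simp_all)]
      have hc : letDig.contains c = true := by
        cases strict with
        | false => simpa using hfirst
        | true => exact letters_sub_letDig c (by simpa using hfirst)
      have hmem : c ∈ letDig := by simpa using hc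
      have hhyp : c ∈ letDigHyp := by simp [letDigHyp, hmem]
      rw [altGo_mid strict 2 (Or.inr rfl) rest]
      cases rest with
      | nil => simpa using ⟨hmem, hhyp⟩
      | cons d rest' =>
        have hlast : (c :: d :: rest').getLast (List.cons_ne_nil c (d :: rest')) =
            (d :: rest').getLast (List.cons_ne_nil d rest') := by
          simp [List.getLast_cons]
        rw [hlast, List.getLast?_eq_some_getLast (l := d :: rest') (by simp)]
        by_cases h2 : ((d :: rest').getLast (List.cons_ne_nil d rest')) ∈ letDig
        · by_cases hall : ∀ x ∈ rest', x ∈ letDigHyp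
          · have hne2 : ¬ ∃ x ∈ rest', x ∉ letDigHyp := by push_neg; exact hall
            have ha : (rest'.all fun ch => decide (ch ∈ letDigHyp)) = true := by
              simp [List.all_eq_true]; exact hall
            simp [h2, hhyp, hne2, ha]
          · obtain ⟨x, hx, hxn⟩ := not_forall₂.mp hall
            have : ¬ (rest'.all fun ch => decide (ch ∈ letDigHyp)) = true := by
              simp [List.all_eq_true]; exact ⟨x, hx, hxn⟩
            simp [h2, hhyp, hx, hxn, Bool.eq_false_iff.mpr this]
        · simp [h2, hhyp]
    · rw [if_neg hfirst, if_pos (by cases strict <;> simp_all)]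

-- ===== VERDICT (by name: the statement is the Claim_ definition above) =====
theorem is_label_spec : Claim_equal_is_label := by
  intro string strict _
  unfold Spec_is_label
  exact is_label_eq_alt string strict
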